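-- pv_equiv track=rewrite | github.com/fakerst/AIO | AIO_collection.py | get_different_gkfs_configs_indices
-- ===== SOURCE A (Python) =====
-- def get_different_gkfs_configs_indices(sorted_configs):
--     different_indices = []
--
--     for index in range(1, len(sorted_configs[0])):
--         for i in range(len(sorted_configs)):
--             if sorted_configs[i][index] != sorted_configs[i][index - 1]:
--                 different_indices.append(index)
--                 break
--
--     return different_indices
-- ===== SOURCE B (Python) =====
-- def get_different_gkfs_configs_indices(sorted_configs):
--     ncols = len(sorted_configs[0])
--     diff = set()
--     for row in sorted_configs:
--         for index in range(1, ncols):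
--             if row[index] != row[index - 1]:
--                 diff.add(index)
--     return sorted(diff)
-- ===== Notes on version B (the rewrite author's own statement) =====
-- stated objective: alternative
-- what changed: Inverts the loop nesting (rows outer, columns inner, no break) and collects differing column indices in a set that is sorted at the end, instead of appending per column with an early break over rows.
-- outside the precondition, e.g. on get_different_gkfs_configs_indices([[1, 2], [5]]): A returns [1], B raises IndexError; on get_different_gkfs_configs_indices([[1, 1], [5]]): A raises IndexError, B raises IndexError
import Mathlib
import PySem

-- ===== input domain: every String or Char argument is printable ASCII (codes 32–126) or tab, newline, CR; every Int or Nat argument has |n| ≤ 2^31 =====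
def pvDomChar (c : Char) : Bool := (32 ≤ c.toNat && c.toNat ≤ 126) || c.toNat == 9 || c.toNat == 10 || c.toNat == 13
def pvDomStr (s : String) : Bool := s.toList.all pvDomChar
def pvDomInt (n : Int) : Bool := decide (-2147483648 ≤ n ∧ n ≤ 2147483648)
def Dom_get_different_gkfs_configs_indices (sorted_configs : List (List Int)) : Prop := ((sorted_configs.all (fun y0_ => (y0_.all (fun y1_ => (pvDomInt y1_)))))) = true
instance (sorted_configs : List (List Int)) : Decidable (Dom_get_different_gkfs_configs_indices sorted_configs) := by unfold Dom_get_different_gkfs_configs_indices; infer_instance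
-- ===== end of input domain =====

-- B inverts the loop nesting (rows outer, columns inner, no break) and collects the differing
-- column indices in a set sorted at the end; same cost, a different decomposition.

-- ===== PORT A =====
-- the inner 'for i … : if diff: append; break' appends index iff some row differs: ported as .any (short-circuits like break)
def get_different_gkfs_configs_indices (sorted_configs : List (List Int)) : List Int :=
  (PySem.List.pyRange 1 ((PySem.List.pyGetD sorted_configs 0 []).length : Int) 1).foldl
    (fun acc index =>
      if (PySem.List.pyRange 0 (sorted_configs.length : Int) 1).any (fun i =>
            PySem.List.pyGetD (PySem.List.pyGetD sorted_configs i []) index 0 !=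
            PySem.List.pyGetD (PySem.List.pyGetD sorted_configs i []) (index - 1) 0)
      then acc ++ [index] else acc) []

-- ===== PORT B =====
def get_different_gkfs_configs_indices_alt (sorted_configs : List (List Int)) : List Int :=
  let ncols : Int := (PySem.List.pyGetD sorted_configs 0 []).length
  let diff : PySem.Set Int :=
    sorted_configs.foldl (fun s row =>
      (PySem.List.pyRange 1 ncols 1).foldl (fun s index =>
        if PySem.List.pyGetD row index 0 != PySem.List.pyGetD row (index - 1) 0
        then PySem.Set.add s index else s) s) PySem.Set.empty
  PySem.List.sorted diff (fun x => x) false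

-- ===== PRECONDITION & SPEC =====
-- Pre_ requires a nonempty input and, whenever the first row has at least two entries (so columns
-- are actually indexed), that every row is at least as long as the first: on an empty input A raises
-- IndexError, and on a row shorter than the first A either raises IndexError or (when a differing
-- column is found before the short row is scanned) returns a value at which B itself raises IndexError.
def Pre_get_different_gkfs_configs_indices (sorted_configs : List (List Int)) : Prop :=
  sorted_configs ≠ [] ∧
  (sorted_configs.headI.length ≤ 1 ∨
    ∀ row ∈ sorted_configs, sorted_configs.headI.length ≤ row.length)
instance (sorted_configs : List (List Int)) : Decidable (Pre_get_different_gkfs_configs_indices sorted_configs) := by unfold Pre_get_different_gkfs_configs_indices; infer_instance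
def pvWitness_get_different_gkfs_configs_indices : List (List Int) := [[1, 2, 2], [3, 3, 4]]

def Spec_get_different_gkfs_configs_indices (sorted_configs : List (List Int)) (out : List Int) : Prop := out = get_different_gkfs_configs_indices_alt sorted_configs
instance (sorted_configs : List (List Int)) (out : List Int) : Decidable (Spec_get_different_gkfs_configs_indices sorted_configs out) := by unfold Spec_get_different_gkfs_configs_indices; infer_instance

-- ===== CLAIM (what is proved, stated in full; the proofs are below) =====
def Claim_equal_get_different_gkfs_configs_indices : Prop := ∀ (sorted_configs : List (List Int)), Dom_get_different_gkfs_configs_indices sorted_configs → Pre_get_different_gkfs_configs_indices sorted_configs → Spec_get_different_gkfs_configs_indices sorted_configs (get_different_gkfs_configs_indices sorted_configs)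

-- ===== LEMMAS AND PROOFS =====

-- membership in B's inner column loop over any index list
theorem pv_mem_inner (row : List Int) (l : List Int) (s : PySem.Set Int) (idx : Int) :
    idx ∈ l.foldl (fun s index =>
        if PySem.List.pyGetD row index 0 != PySem.List.pyGetD row (index - 1) 0
        then PySem.Set.add s index else s) s ↔
      idx ∈ s ∨ (idx ∈ l ∧
        (PySem.List.pyGetD row idx 0 != PySem.List.pyGetD row (idx - 1) 0) = true) := by
  induction l generalizing s with
  | nil => simp
  | cons x xs ih =>
    simp only [List.foldl_cons, List.mem_cons]
    by_cases h : (PySem.List.pyGetD row x 0 != PySem.List.pyGetD row (x - 1) 0) = true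
    · rw [if_pos h, ih]
      simp only [PySem.Set.mem_add]
      constructor
      · rintro ((hs | he) | hx)
        · exact Or.inl hs
        · exact Or.inr ⟨Or.inl he, he ▸ h⟩
        · exact Or.inr ⟨Or.inr hx.1, hx.2⟩
      · rintro (hs | ⟨he | hx, hd⟩)
        · exact Or.inl (Or.inl hs)
        · exact Or.inl (Or.inr he)
        · exact Or.inr ⟨hx, hd⟩
    · rw [if_neg h, ih]
      constructor
      · rintro (hs | hx)
        · exact Or.inl hs
        · exact Or.inr ⟨Or.inr hx.1, hx.2⟩
      · rintro (hs | ⟨he | hx, hd⟩)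
        · exact Or.inl hs
        · exact absurd (he ▸ hd) h
        · exact Or.inr ⟨hx, hd⟩

theorem pv_nodup_inner (row : List Int) (l : List Int) (s : PySem.Set Int) (hs : s.Nodup) :
    (l.foldl (fun s index =>
        if PySem.List.pyGetD row index 0 != PySem.List.pyGetD row (index - 1) 0
        then PySem.Set.add s index else s) s).Nodup := by
  induction l generalizing s with
  | nil => exact hs
  | cons x xs ih =>
    simp only [List.foldl_cons]
    split
    · exact ih _ (PySem.Set.nodup_add _ _ hs)
    · exact ih _ hs

-- membership in B's outer row loop
theorem pv_mem_outer (rows : List (List Int)) (l : List Int) (s : PySem.Set Int) (idx : Int) :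
    idx ∈ rows.foldl (fun s row =>
        l.foldl (fun s index =>
          if PySem.List.pyGetD row index 0 != PySem.List.pyGetD row (index - 1) 0
          then PySem.Set.add s index else s) s) s ↔
      idx ∈ s ∨ (idx ∈ l ∧ ∃ row ∈ rows,
        (PySem.List.pyGetD row idx 0 != PySem.List.pyGetD row (idx - 1) 0) = true) := by
  induction rows generalizing s with
  | nil => simp
  | cons r rs ih =>
    simp only [List.foldl_cons, ih, pv_mem_inner, List.mem_cons]
    constructor
    · rintro ((hs | ⟨hl, hd⟩) | ⟨hl, row, hr, hd⟩)
      · exact Or.inl hs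
      · exact Or.inr ⟨hl, r, Or.inl rfl, hd⟩
      · exact Or.inr ⟨hl, row, Or.inr hr, hd⟩
    · rintro (hs | ⟨hl, row, (rfl | hr), hd⟩)
      · exact Or.inl (Or.inl hs)
      · exact Or.inl (Or.inr ⟨hl, hd⟩)
      · exact Or.inr ⟨hl, row, hr, hd⟩

theorem pv_nodup_outer (rows : List (List Int)) (l : List Int) (s : PySem.Set Int) (hs : s.Nodup) :
    (rows.foldl (fun s row =>
        l.foldl (fun s index =>
          if PySem.List.pyGetD row index 0 != PySem.List.pyGetD row (index - 1) 0
          then PySem.Set.add s index else s) s) s).Nodup := by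
  induction rows generalizing s with
  | nil => exact hs
  | cons r rs ih => exact ih _ (pv_nodup_inner r l s hs)

-- A's inner index loop over the rows is an .any over the row list itself
theorem pv_any_rows (xs : List (List Int)) (p : List Int → Bool) :
    (PySem.List.pyRange 0 (xs.length : Int) 1).any
        (fun i => p (PySem.List.pyGetD xs i [])) = xs.any p := by
  conv_rhs => rw [← PySem.List.map_pyGetD_pyRange_zero' (xs := xs) (d := ([] : List Int))]
  rw [List.any_map]
  rfl

-- ===== VERDICT (by name: the statement is the Claim_ definition above) =====
theorem get_different_gkfs_configs_indices_spec : Claim_equal_get_different_gkfs_configs_indices := by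
  intro sorted_configs _ _
  unfold Spec_get_different_gkfs_configs_indices
  unfold get_different_gkfs_configs_indices get_different_gkfs_configs_indices_alt
  simp only [PySem.List.foldl_append_if_eq_filter, List.nil_append]
  refine Eq.symm (PySem.List.sorted_eq_of_perm_of_pairwise_lt _ _ _ ?_ ?_)
  · -- the filtered range is a permutation of B's final set
    apply (List.perm_ext_iff_of_nodup
      (List.Nodup.filter _ (PySem.List.nodup_pyRange_one _ _))
      (pv_nodup_outer _ _ _ List.nodup_nil)).mpr
    intro idx
    rw [List.mem_filter, pv_mem_outer,
      pv_any_rows sorted_configs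
        (fun row => PySem.List.pyGetD row idx 0 != PySem.List.pyGetD row (idx - 1) 0)]
    simp [List.any_eq_true]
  · -- it is strictly increasing
    exact List.Pairwise.filter _ (PySem.List.pairwise_lt_pyRange_one _ _)
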